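-- pv_equiv track=rewrite | github.com/daviddagyei/SAT-Tutor | backend/app/utils/pdf_processing/transformer.py | assign_topic
-- ===== SOURCE A (Python) =====
-- from typing import Dict, List, Any, Optional
--
-- TOPIC_MAP = {
--     "MATH": {
--         "algebra": "algebra_topic_id",
--         "geometry": "geometry_topic_id",
--         "statistics": "statistics_topic_id",
--         "problem_solving": "problem_solving_topic_id",
--         # Add more math topics as needed
--     },
--     "READING_WRITING": {
--         "reading_comprehension": "reading_comprehension_topic_id",
--         "grammar": "grammar_topic_id",
--         "vocabulary": "vocabulary_topic_id",
--         "writing": "writing_topic_id",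
--         # Add more reading/writing topics as needed
--     }
-- }
--
-- def assign_topic(question: Dict[str, Any]) -> str:
--     """
--     Assign a topic ID to a question based on content analysis
--
--     Args:
--         question: The question data dictionary
--
--     Returns:
--         A topic ID
--     """
--     # This is a simplified topic assignment - in a real implementation,
--     # you'd use NLP or keyword matching to determine the appropriate topic
--
--     section = question.get("section", "")
--     text = question.get("text", "").lower()
--
--     if section == "MATH":
--         if any(kw in text for kw in ["equation", "solve", "expression", "variable"]):
--             return TOPIC_MAP["MATH"]["algebra"]
--         elif any(kw in text for kw in ["angle", "triangle", "circle", "rectangle"]):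
--             return TOPIC_MAP["MATH"]["geometry"]
--         elif any(kw in text for kw in ["probability", "average", "mean", "median"]):
--             return TOPIC_MAP["MATH"]["statistics"]
--         else:
--             return TOPIC_MAP["MATH"]["problem_solving"]
--     else:  # READING_WRITING
--         if "comprehension" in question.get("question_type", ""):
--             return TOPIC_MAP["READING_WRITING"]["reading_comprehension"]
--         elif any(kw in text for kw in ["grammar", "punctuation", "sentence"]):
--             return TOPIC_MAP["READING_WRITING"]["grammar"]
--         elif any(kw in text for kw in ["vocabulary", "meaning", "definition"]):
--             return TOPIC_MAP["READING_WRITING"]["vocabulary"]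
--         else:
--             return TOPIC_MAP["READING_WRITING"]["writing"]
-- ===== SOURCE B (Python) =====
-- # B: rank-minimisation. Each section has a flat keyword->rank map; B scans every
-- # keyword once, keeps the MINIMUM rank of any keyword present in the text, and
-- # indexes a topic list with that rank (default = last entry). Same results as A's
-- # ordered elif ladder because A returns the topic of the lowest-ranked matching group.
-- MATH_KW = {"equation": 0, "solve": 0, "expression": 0, "variable": 0,
--            "angle": 1, "triangle": 1, "circle": 1, "rectangle": 1,
--            "probability": 2, "average": 2, "mean": 2, "median": 2}
-- MATH_TOPICS = ["algebra_topic_id", "geometry_topic_id",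
--                "statistics_topic_id", "problem_solving_topic_id"]
-- RW_KW = {"grammar": 0, "punctuation": 0, "sentence": 0,
--          "vocabulary": 1, "meaning": 1, "definition": 1}
-- RW_TOPICS = ["grammar_topic_id", "vocabulary_topic_id", "writing_topic_id"]
--
-- def assign_topic(question):
--     text = question.get("text", "").lower()
--     if question.get("section", "") == "MATH":
--         kwmap, topics = MATH_KW, MATH_TOPICS
--     elif "comprehension" in question.get("question_type", ""):
--         return "reading_comprehension_topic_id"
--     else:
--         kwmap, topics = RW_KW, RW_TOPICS
--     best = len(topics) - 1
--     for kw, rank in kwmap.items():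
--         if rank < best and kw in text:
--             best = rank
--     return topics[best]
-- ===== Notes on version B (the rewrite author's own statement) =====
-- stated objective: alternative
-- what changed: Replaced A's ordered elif ladder of any()-group tests and TOPIC_MAP lookups by a single min-rank scan: a flat keyword->rank map is traversed once keeping the minimum rank of any keyword present, and a rank-indexed topic list (default = last entry) yields the result.
import Mathlib
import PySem

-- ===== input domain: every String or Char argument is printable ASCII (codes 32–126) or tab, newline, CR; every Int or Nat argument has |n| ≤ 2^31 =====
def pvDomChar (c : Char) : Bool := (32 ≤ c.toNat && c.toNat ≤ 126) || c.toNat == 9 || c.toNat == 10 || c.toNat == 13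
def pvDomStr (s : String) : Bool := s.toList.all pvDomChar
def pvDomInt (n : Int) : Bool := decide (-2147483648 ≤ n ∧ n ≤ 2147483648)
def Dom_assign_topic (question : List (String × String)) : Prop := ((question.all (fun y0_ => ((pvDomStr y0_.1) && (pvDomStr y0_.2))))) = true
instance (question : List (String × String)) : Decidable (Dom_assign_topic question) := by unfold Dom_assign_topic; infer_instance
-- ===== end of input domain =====

-- B replaces A's ordered elif ladder by a single min-rank scan over a flat
-- keyword->rank map, indexing a topic list with the best rank (objective: alternative decomposition).


-- ===== PORT A =====
-- TOPIC_MAP (module constant), as two association-list dicts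
def pvTopicMapMath : PySem.Dict String String :=
  PySem.Dict.mk [("algebra", "algebra_topic_id"), ("geometry", "geometry_topic_id"),
   ("statistics", "statistics_topic_id"), ("problem_solving", "problem_solving_topic_id")]
def pvTopicMapRW : PySem.Dict String String :=
  PySem.Dict.mk [("reading_comprehension", "reading_comprehension_topic_id"), ("grammar", "grammar_topic_id"),
   ("vocabulary", "vocabulary_topic_id"), ("writing", "writing_topic_id")]

def assign_topic (question : List (String × String)) : String :=
  let q : PySem.Dict String String := PySem.Dict.mk question
  let sect := PySem.Dict.getD q "section" ""
  let text := PySem.Str.lower (PySem.Dict.getD q "text" "")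
  if sect == "MATH" then
    if (["equation", "solve", "expression", "variable"].any (fun kw => PySem.Str.isIn kw text)) then
      PySem.Dict.getD pvTopicMapMath "algebra" ""
    else if (["angle", "triangle", "circle", "rectangle"].any (fun kw => PySem.Str.isIn kw text)) then
      PySem.Dict.getD pvTopicMapMath "geometry" ""
    else if (["probability", "average", "mean", "median"].any (fun kw => PySem.Str.isIn kw text)) then
      PySem.Dict.getD pvTopicMapMath "statistics" ""
    else
      PySem.Dict.getD pvTopicMapMath "problem_solving" ""
  else
    if PySem.Str.isIn "comprehension" (PySem.Dict.getD q "question_type" "") then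
      PySem.Dict.getD pvTopicMapRW "reading_comprehension" ""
    else if (["grammar", "punctuation", "sentence"].any (fun kw => PySem.Str.isIn kw text)) then
      PySem.Dict.getD pvTopicMapRW "grammar" ""
    else if (["vocabulary", "meaning", "definition"].any (fun kw => PySem.Str.isIn kw text)) then
      PySem.Dict.getD pvTopicMapRW "vocabulary" ""
    else
      PySem.Dict.getD pvTopicMapRW "writing" ""

-- ===== PORT B =====
-- flat keyword -> rank maps and rank-indexed topic lists (module constants of Source B)
def pvMathKW : List (String × Nat) :=
  [("equation", 0), ("solve", 0), ("expression", 0), ("variable", 0),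
   ("angle", 1), ("triangle", 1), ("circle", 1), ("rectangle", 1),
   ("probability", 2), ("average", 2), ("mean", 2), ("median", 2)]
def pvMathTopics : List String :=
  ["algebra_topic_id", "geometry_topic_id", "statistics_topic_id", "problem_solving_topic_id"]
def pvRWKW : List (String × Nat) :=
  [("grammar", 0), ("punctuation", 0), ("sentence", 0),
   ("vocabulary", 1), ("meaning", 1), ("definition", 1)]
def pvRWTopics : List String := ["grammar_topic_id", "vocabulary_topic_id", "writing_topic_id"]

-- the 'for kw, rank in kwmap.items(): if rank < best and kw in text: best = rank' loop of Source B
def pvBest (kwmap : List (String × Nat)) (text : String) (best : Nat) : Nat :=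
  match kwmap with
  | [] => best
  | (kw, rank) :: rest =>
      pvBest rest text (if rank < best && PySem.Str.isIn kw text then rank else best)

def assign_topic_alt (question : List (String × String)) : String :=
  let q : PySem.Dict String String := PySem.Dict.mk question
  let text := PySem.Str.lower (PySem.Dict.getD q "text" "")
  if PySem.Dict.getD q "section" "" == "MATH" then
    pvMathTopics.getD (pvBest pvMathKW text (pvMathTopics.length - 1)) ""
  else if PySem.Str.isIn "comprehension" (PySem.Dict.getD q "question_type" "") then
    "reading_comprehension_topic_id"
  else
    pvRWTopics.getD (pvBest pvRWKW text (pvRWTopics.length - 1)) ""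

-- ===== PRECONDITION & SPEC =====
def Spec_assign_topic (question : List (String × String)) (out : String) : Prop := out = assign_topic_alt question
instance (question : List (String × String)) (out : String) : Decidable (Spec_assign_topic question out) := by unfold Spec_assign_topic; infer_instance

-- ===== CLAIM (what is proved, stated in full; the proofs are below) =====
def Claim_equal_assign_topic : Prop := ∀ (question : List (String × String)), Dom_assign_topic question → Spec_assign_topic question (assign_topic question)

-- ===== LEMMAS AND PROOFS =====

-- a same-rank keyword group collapses to one 'any' test on the accumulator
theorem pvBest_group (kws : List String) (r : Nat) (rest : List (String × Nat))
    (text : String) (best : Nat) :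
    pvBest (kws.map (fun k => (k, r)) ++ rest) text best =
      pvBest rest text
        (if r < best && kws.any (fun kw => PySem.Str.isIn kw text) then r else best) := by
  induction kws generalizing best with
  | nil => simp
  | cons k kws ih =>
      simp only [List.map, List.cons_append, pvBest, List.any_cons, ih]
      by_cases h1 : PySem.Chars.isIn k.toList text.toList <;> by_cases h2 : r < best <;>
        simp [h1, h2]

-- the min-rank scan over the MATH keyword map, characterised as A's ordered group test
theorem pvBest_math (text : String) :
    pvMathTopics.getD (pvBest pvMathKW text (pvMathTopics.length - 1)) "" =
    (if (["equation", "solve", "expression", "variable"].any (fun kw => PySem.Str.isIn kw text)) then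
      "algebra_topic_id"
    else if (["angle", "triangle", "circle", "rectangle"].any (fun kw => PySem.Str.isIn kw text)) then
      "geometry_topic_id"
    else if (["probability", "average", "mean", "median"].any (fun kw => PySem.Str.isIn kw text)) then
      "statistics_topic_id"
    else "problem_solving_topic_id") := by
  have e : pvMathKW =
      (["equation", "solve", "expression", "variable"].map (fun k => (k, 0)) ++
       (["angle", "triangle", "circle", "rectangle"].map (fun k => (k, 1)) ++
        (["probability", "average", "mean", "median"].map (fun k => (k, 2)) ++ []))) := rfl
  rw [e, pvBest_group, pvBest_group, pvBest_group]
  simp only [pvMathTopics, List.length, pvBest]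
  split_ifs <;> simp_all

theorem pvBest_rw (text : String) :
    pvRWTopics.getD (pvBest pvRWKW text (pvRWTopics.length - 1)) "" =
    (if (["grammar", "punctuation", "sentence"].any (fun kw => PySem.Str.isIn kw text)) then
      "grammar_topic_id"
    else if (["vocabulary", "meaning", "definition"].any (fun kw => PySem.Str.isIn kw text)) then
      "vocabulary_topic_id"
    else "writing_topic_id") := by
  have e : pvRWKW =
      (["grammar", "punctuation", "sentence"].map (fun k => (k, 0)) ++
       (["vocabulary", "meaning", "definition"].map (fun k => (k, 1)) ++ [])) := rfl
  rw [e, pvBest_group, pvBest_group]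
  simp only [pvRWTopics, List.length, pvBest]
  split_ifs <;> simp_all

-- ===== VERDICT (by name: the statement is the Claim_ definition above) =====
theorem assign_topic_spec : Claim_equal_assign_topic := by
  intro q _
  unfold Spec_assign_topic assign_topic assign_topic_alt
  simp only [pvBest_math, pvBest_rw, pvTopicMapMath, pvTopicMapRW]
  split_ifs <;> rfl
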